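-- pv_equiv track=rewrite | github.com/jhmarryme/Python-in-action | inbox/2024_company_algorithm/A02_旋转数字游戏/entry.py | solve
-- ===== SOURCE A (Python) =====
-- def solve(n: int, m: int, k: int) -> str:
--     digits_in_row = []
--
--     for j in range(1, m + 1):
--         L = min(k - 1, j - 1, n - k, m - j)
--         S = L * (2 * n + 2 * m - 4 * L)
--
--         w = m - 2 * L  # Width
--         h = n - 2 * L  # Height
--
--         if k == L + 1:
--             P = j - (L + 1)
--         elif j == m - L:
--             P = (w - 1) + (k - (L + 1))
--         elif k == n - L:
--             P = (w - 1) + (h - 1) + (m - L - j)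
--         elif j == L + 1:
--             P = 2 * (w - 1) + (h - 1) + (n - L - k)
--         else:
--             P = 0
--
--         step = S + P
--         digit = step % 10
--         digits_in_row.append(str(digit))
--
--     s = ''.join(digits_in_row)
--
--     return s
-- ===== SOURCE B (Python) =====
-- def _idx(n, m, i, j):
--     # spiral index of cell (i, j) (1-based) in an n x m grid, by peeling layers:
--     # cells on the outer ring are indexed directly; otherwise drop into the inner
--     # (n-2) x (m-2) grid, accumulating the outer ring's perimeter as an offset.
--     acc = 0
--     while True:
--         if i == 1:
--             return acc + (j - 1)
--         if j == m:
--             return acc + (m - 1) + (i - 1)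
--         if i == n:
--             return acc + (m - 1) + (n - 1) + (m - j)
--         if j == 1:
--             return acc + 2 * (m - 1) + (n - 1) + (n - i)
--         acc += 2 * n + 2 * m - 4
--         n, m, i, j = n - 2, m - 2, i - 1, j - 1
--
--
-- def solve(n: int, m: int, k: int) -> str:
--     return ''.join(str(_idx(n, m, k, j) % 10) for j in range(1, m + 1))
-- ===== Notes on version B (the rewrite author's own statement) =====
-- stated objective: alternative
-- what changed: Replaces A's per-column closed-form layer arithmetic (min over four distances, quadratic perimeter-sum formula S=L*(2n+2m-4L) and a four-branch position formula) by an iterative peeling of spiral layers: a helper loop yields the spiral index of a cell directly when the cell lies on the outer ring and otherwise drops into the (n-2)x(m-2) inner grid, accumulating the outer ring's perimeter as an offset; Pre_ restricts to the natural domain (row k exists, or m < 1 giving the empty row); …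
-- outside the precondition, e.g. on solve(2, 3, 5): A returns '432', B returns '296'; on solve(7, 10, 58): A returns '1098765432', B returns '3618763236'; on solve(4, 7, 60): A returns '9876543', B returns '9036705'
import Mathlib
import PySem

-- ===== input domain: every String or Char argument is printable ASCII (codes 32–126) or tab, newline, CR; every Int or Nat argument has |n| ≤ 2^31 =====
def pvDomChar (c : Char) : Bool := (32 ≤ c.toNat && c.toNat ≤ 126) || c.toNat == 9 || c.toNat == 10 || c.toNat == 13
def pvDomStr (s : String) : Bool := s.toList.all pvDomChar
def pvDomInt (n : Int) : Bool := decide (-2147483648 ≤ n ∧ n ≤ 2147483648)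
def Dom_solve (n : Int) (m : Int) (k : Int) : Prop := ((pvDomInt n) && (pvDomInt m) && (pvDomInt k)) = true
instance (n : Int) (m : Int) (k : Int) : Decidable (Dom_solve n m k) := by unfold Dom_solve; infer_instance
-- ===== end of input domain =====

-- B replaces A's per-column closed-form layer formula (min + quadratic perimeter sum) by an
-- iterative layer-peeling of the spiral (outer ring indexed directly, else peel into the inner
-- grid with a perimeter offset): objective 'alternative' (no speed claim).

-- ===== PORT A =====
def solve (n : Int) (m : Int) (k : Int) : String :=
  let digits_in_row : List String :=
    (PySem.List.pyRange 1 (m + 1) 1).foldl (fun acc j =>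
      let L := min (min (min (k - 1) (j - 1)) (n - k)) (m - j)
      let S := L * (2 * n + 2 * m - 4 * L)
      let w := m - 2 * L
      let h := n - 2 * L
      let P :=
        if k = L + 1 then j - (L + 1)
        else if j = m - L then (w - 1) + (k - (L + 1))
        else if k = n - L then (w - 1) + (h - 1) + (m - L - j)
        else if j = L + 1 then 2 * (w - 1) + (h - 1) + (n - L - k)
        else 0
      let step := S + P
      let digit := PySem.Int.mod step 10
      acc ++ [PySem.Int.toStr digit]) []
  PySem.Str.join "" digits_in_row

-- ===== PORT B =====
-- _idx of Source B (its unguarded peeling loop, as structural recursion on a fuel counter; the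
-- accumulator becomes an offset added in front of the recursive call). The fuel only makes the
-- loop total in Lean: the bound passed below exceeds the number of peeling steps whenever the
-- Python loop terminates with 1 <= j <= m, so it is never exhausted there.
def idxFuel (fuel : Nat) (n : Int) (m : Int) (i : Int) (j : Int) : Int :=
  match fuel with
  | 0 => 0
  | fuel + 1 =>
    if i = 1 then j - 1
    else if j = m then (m - 1) + (i - 1)
    else if i = n then (m - 1) + (n - 1) + (m - j)
    else if j = 1 then 2 * (m - 1) + (n - 1) + (n - i)
    else (2 * n + 2 * m - 4) + idxFuel fuel (n - 2) (m - 2) (i - 1) (j - 1)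

def solve_alt (n : Int) (m : Int) (k : Int) : String :=
  PySem.Str.join ""
    ((PySem.List.pyRange 1 (m + 1) 1).map (fun j =>
      PySem.Int.toStr
        (PySem.Int.mod
          (idxFuel ((k - 1).toNat + (n - k).toNat + (j - 1).toNat + (m - j).toNat + 1) n m k j)
          10)))

-- ===== PRECONDITION & SPEC =====
-- Pre_ restricts to the task's natural domain plus the empty row: either row k exists in an
-- actual n×m spiral grid (1 ≤ k ≤ n, 1 ≤ m), or m < 1 (no columns; both programs return "").
-- Excluded is only the malformed input with m ≥ 1 and k outside 1..n, which asks for a row the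
-- grid does not have: no spiral numbering is defined for nonexistent cells, so nothing specifies
-- a result there, and the two implementations legitimately return different strings (A evaluates
-- its formula with a negative layer number; B peels layers); mirroring one in the other would
-- mean adding branches for inputs outside the task's natural domain.
def Pre_solve (n : Int) (m : Int) (k : Int) : Prop := (1 ≤ k ∧ k ≤ n ∧ 1 ≤ m) ∨ m < 1
instance (n : Int) (m : Int) (k : Int) : Decidable (Pre_solve n m k) := by unfold Pre_solve; infer_instance
def pvWitness_solve : Int × Int × Int := (3, 4, 2)

def Spec_solve (n : Int) (m : Int) (k : Int) (out : String) : Prop := out = solve_alt n m k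
instance (n : Int) (m : Int) (k : Int) (out : String) : Decidable (Spec_solve n m k out) := by unfold Spec_solve; infer_instance

-- ===== CLAIM (what is proved, stated in full; the proofs are below) =====
def Claim_equal_solve : Prop := ∀ (n : Int) (m : Int) (k : Int), Dom_solve n m k → Pre_solve n m k → Spec_solve n m k (solve n m k)

-- ===== LEMMAS AND PROOFS =====

-- A's per-column closed-form step (the body of A's loop), for use in the proofs.
def aStep (n : Int) (m : Int) (i : Int) (j : Int) : Int :=
  let L := min (min (min (i - 1) (j - 1)) (n - i)) (m - j)
  let S := L * (2 * n + 2 * m - 4 * L)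
  let w := m - 2 * L
  let h := n - 2 * L
  let P :=
    if i = L + 1 then j - (L + 1)
    else if j = m - L then (w - 1) + (i - (L + 1))
    else if i = n - L then (w - 1) + (h - 1) + (m - L - j)
    else if j = L + 1 then 2 * (w - 1) + (h - 1) + (n - L - i)
    else 0
  S + P

theorem foldl_append_singleton {α β : Type} (f : α → β) (xs : List α) (acc : List β) :
    xs.foldl (fun a x => a ++ [f x]) acc = acc ++ xs.map f := by
  induction xs generalizing acc with
  | nil => simp
  | cons x xs ih => simp [List.foldl_cons, ih]

theorem solve_eq_join (n m k : Int) :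
    solve n m k =
      PySem.Str.join ""
        ((PySem.List.pyRange 1 (m + 1) 1).map (fun j =>
          PySem.Int.toStr (PySem.Int.mod (aStep n m k j) 10))) := by
  unfold solve aStep
  rw [foldl_append_singleton]
  simp

-- aStep with its layer number as an explicit parameter and lets expanded (definitional)
def aStepE (n : Int) (m : Int) (i : Int) (j : Int) (L : Int) : Int :=
  L * (2 * n + 2 * m - 4 * L) +
    (if i = L + 1 then j - (L + 1)
     else if j = m - L then (m - 2 * L - 1) + (i - (L + 1))
     else if i = n - L then (m - 2 * L - 1) + (n - 2 * L - 1) + (m - L - j)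
     else if j = L + 1 then 2 * (m - 2 * L - 1) + (n - 2 * L - 1) + (n - L - i)
     else 0)

theorem aStep_eq (n m i j : Int) :
    aStep n m i j = aStepE n m i j (min (min (min (i - 1) (j - 1)) (n - i)) (m - j)) := rfl

-- the key lemma: layer-peeling computes A's closed form on every real cell
theorem idx_eq_aStep (fuel : Nat) :
    ∀ (n m i j : Int), 1 ≤ i → i ≤ n → 1 ≤ j → j ≤ m →
      min (min (min (i - 1) (j - 1)) (n - i)) (m - j) < (fuel : Int) →
      idxFuel fuel n m i j = aStep n m i j := by
  induction fuel with
  | zero =>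
    intro n m i j h1 h2 h3 h4 hf
    exfalso; omega
  | succ fuel ih =>
    intro n m i j h1 h2 h3 h4 hf
    rw [aStep_eq]
    simp only [idxFuel]
    set L := min (min (min (i - 1) (j - 1)) (n - i)) (m - j) with hLdef
    by_cases hi1 : i = 1
    · rw [if_pos hi1]
      have hL : L = 0 := by omega
      rw [hL]
      simp only [aStepE, zero_mul, zero_add]
      split_ifs <;> omega
    · rw [if_neg hi1]
      by_cases hjm : j = m
      · rw [if_pos hjm]
        have hL : L = 0 := by omega
        rw [hL]
        simp only [aStepE, zero_mul, zero_add]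
        split_ifs <;> omega
      · rw [if_neg hjm]
        by_cases hin : i = n
        · rw [if_pos hin]
          have hL : L = 0 := by omega
          rw [hL]
          simp only [aStepE, zero_mul, zero_add]
          split_ifs <;> omega
        · rw [if_neg hin]
          by_cases hj1 : j = 1
          · rw [if_pos hj1]
            have hL : L = 0 := by omega
            rw [hL]
            simp only [aStepE, zero_mul, zero_add]
            split_ifs <;> omega
          · -- interior cell: peel one layer and use the induction hypothesis
            rw [if_neg hj1]
            have hrec := ih (n - 2) (m - 2) (i - 1) (j - 1)
              (by omega) (by omega) (by omega) (by omega) (by omega)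
            rw [hrec, aStep_eq]
            have hL' : min (min (min (i - 1 - 1) (j - 1 - 1)) (n - 2 - (i - 1))) (m - 2 - (j - 1)) = L - 1 := by omega
            rw [hL']
            have hL1 : 1 ≤ L := by omega
            simp only [aStepE]
            -- the four branch conditions coincide between the outer and the peeled grid
            by_cases c1 : i = L + 1
            · rw [if_pos c1, if_pos (show i - 1 = L - 1 + 1 by omega)]
              ring
            · rw [if_neg c1, if_neg (show ¬ (i - 1 = L - 1 + 1) by omega)]
              by_cases c2 : j = m - L
              · rw [if_pos c2, if_pos (show j - 1 = m - 2 - (L - 1) by omega)]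
                ring
              · rw [if_neg c2, if_neg (show ¬ (j - 1 = m - 2 - (L - 1)) by omega)]
                by_cases c3 : i = n - L
                · rw [if_pos c3, if_pos (show i - 1 = n - 2 - (L - 1) by omega)]
                  ring
                · rw [if_neg c3, if_neg (show ¬ (i - 1 = n - 2 - (L - 1)) by omega)]
                  by_cases c4 : j = L + 1
                  · rw [if_pos c4, if_pos (show j - 1 = L - 1 + 1 by omega)]
                    ring
                  · -- the minimum is attained by one of the four sides: contradiction
                    exfalso; omega

-- ===== VERDICT (by name: the statement is the Claim_ definition above) =====
theorem solve_spec : Claim_equal_solve := by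
  intro n m k _ hpre
  unfold Spec_solve
  rw [solve_eq_join]
  unfold solve_alt
  congr 1
  apply List.map_congr_left
  intro j hj
  rw [PySem.List.mem_pyRange_one] at hj
  rcases hpre with ⟨hk1, hkn, hm⟩ | hm
  · have hfuel : min (min (min (k - 1) (j - 1)) (n - k)) (m - j) <
        (((k - 1).toNat + (n - k).toNat + (j - 1).toNat + (m - j).toNat + 1 : Nat) : Int) := by
      omega
    rw [idx_eq_aStep _ n m k j hk1 hkn (by omega) (by omega) hfuel]
  · -- m < 1: the column range is empty, there is no j
    exact absurd hj.2 (by omega)
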